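-- pv_equiv track=rewrite | github.com/ZoeLoveHGJ/Project_LODS_MTI | Exp_Sup_5_Tolerance_Recover.py | _find_perfect_seed
-- ===== SOURCE A (Python) =====
-- from typing import Dict, Any, List, Tuple, Optional
--
-- def _find_perfect_seed(epc_ints: List[int], mod_size: int) -> Optional[int]:
--     for seed in range(16):
--         slots = set()
--         collision = False
--         for val in epc_ints:
--             s = (val ^ seed) % mod_size
--             if s in slots:
--                 collision = True
--                 break
--             slots.add(s)
--         if not collision: return seed
--     return None
-- ===== SOURCE B (Python) =====
-- from typing import List, Optional
--
-- def _find_perfect_seed(epc_ints: List[int], mod_size: int) -> Optional[int]: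
--     # Pair-driven sieve: for every unordered pair of entries, mark every seed
--     # that hashes the two to the same slot as bad; then return the first
--     # unmarked seed.
--     n = len(epc_ints)
--     bad = set()
--     for i in range(n):
--         for j in range(i + 1, n):
--             a = epc_ints[i]
--             b = epc_ints[j]
--             for seed in range(16):
--                 if (a ^ seed) % mod_size == (b ^ seed) % mod_size:
--                     bad.add(seed)
--     for seed in range(16):
--         if seed not in bad:
--             return seed
--     return None
-- ===== Notes on version B (the rewrite author's own statement) =====
-- stated objective: alternative
-- what changed: Replaces A's seed-by-seed scan with incremental set insertion and break by a pair-driven sieve: one pass over all unordered pairs of entries marks every seed on which the pair collides into a bad-seed set, then a first-fit scan over range(16) returns the first unmarked seed.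
import Mathlib
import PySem

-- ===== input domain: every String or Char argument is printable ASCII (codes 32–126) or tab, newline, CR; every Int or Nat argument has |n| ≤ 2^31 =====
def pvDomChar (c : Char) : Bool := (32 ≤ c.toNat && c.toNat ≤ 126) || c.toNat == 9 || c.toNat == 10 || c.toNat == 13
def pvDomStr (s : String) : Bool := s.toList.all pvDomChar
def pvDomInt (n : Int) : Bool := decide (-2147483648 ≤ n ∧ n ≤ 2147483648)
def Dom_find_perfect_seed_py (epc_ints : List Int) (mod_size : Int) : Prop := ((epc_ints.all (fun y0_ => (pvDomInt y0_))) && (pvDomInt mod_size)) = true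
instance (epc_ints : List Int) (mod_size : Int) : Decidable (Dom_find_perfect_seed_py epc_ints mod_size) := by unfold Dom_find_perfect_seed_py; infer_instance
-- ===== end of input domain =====

-- B replaces A's per-seed incremental set scan by a pair-driven sieve (mark bad seeds over all pairs, then first-fit); return-value equivalence on Pre_ (mod_size ≠ 0 or empty list).


-- ===== PORT A =====
-- inner 'for val in epc_ints' loop with the break: returns the final 'collision' flag
def pvInnerA (seed mod_size : Int) : List Int → PySem.Set Int → Bool
  | [], _ => false
  | val :: rest, slots =>
    let s := PySem.Int.mod (PySem.Int.bxor val seed) mod_size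
    if PySem.Set.contains slots s then true
    else pvInnerA seed mod_size rest (PySem.Set.add slots s)

-- outer 'for seed in range(16)' loop
def pvSeedLoopA (epc_ints : List Int) (mod_size : Int) : List Int → Option Int
  | [] => none
  | seed :: rest =>
    if pvInnerA seed mod_size epc_ints PySem.Set.empty then pvSeedLoopA epc_ints mod_size rest
    else some seed

def find_perfect_seed_py (epc_ints : List Int) (mod_size : Int) : Option Int :=
  pvSeedLoopA epc_ints mod_size (PySem.List.pyRange 0 16 1)

-- ===== PORT B =====
-- innermost 'for seed in range(16)' body: mark seed bad if the pair collides
def pvStepSeed (mod_size a b : Int) (bad : PySem.Set Int) (seed : Int) : PySem.Set Int :=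
  if PySem.Int.mod (PySem.Int.bxor a seed) mod_size = PySem.Int.mod (PySem.Int.bxor b seed) mod_size
  then PySem.Set.add bad seed else bad

-- body of 'for j in range(i+1, n)'
def pvStepJ (epc_ints : List Int) (mod_size i : Int) (bad : PySem.Set Int) (j : Int) : PySem.Set Int :=
  let a := PySem.List.pyGetD epc_ints i 0
  let b := PySem.List.pyGetD epc_ints j 0
  (PySem.List.pyRange 0 16 1).foldl (pvStepSeed mod_size a b) bad

-- body of 'for i in range(n)'
def pvStepI (epc_ints : List Int) (mod_size : Int) (bad : PySem.Set Int) (i : Int) : PySem.Set Int :=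
  (PySem.List.pyRange (i + 1) (epc_ints.length : Int) 1).foldl (pvStepJ epc_ints mod_size i) bad

-- the bad-seed sieve
def pvBadSet (epc_ints : List Int) (mod_size : Int) : PySem.Set Int :=
  (PySem.List.pyRange 0 (epc_ints.length : Int) 1).foldl (pvStepI epc_ints mod_size) PySem.Set.empty

-- final 'for seed in range(16): if seed not in bad: return seed'
def pvFirstGood (bad : PySem.Set Int) : List Int → Option Int
  | [] => none
  | s :: rest => if PySem.Set.contains bad s then pvFirstGood bad rest else some s

def find_perfect_seed_py_alt (epc_ints : List Int) (mod_size : Int) : Option Int :=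
  pvFirstGood (pvBadSet epc_ints mod_size) (PySem.List.pyRange 0 16 1)

-- ===== PRECONDITION & SPEC =====
-- Pre_ excludes exactly the inputs where Python A raises ZeroDivisionError: mod_size = 0 with a nonempty list.
def Pre_find_perfect_seed_py (epc_ints : List Int) (mod_size : Int) : Prop :=
  epc_ints = [] ∨ mod_size ≠ 0
instance (epc_ints : List Int) (mod_size : Int) : Decidable (Pre_find_perfect_seed_py epc_ints mod_size) := by unfold Pre_find_perfect_seed_py; infer_instance
def pvWitness_find_perfect_seed_py : List Int × Int := ([3, 5, 6], 4)

def Spec_find_perfect_seed_py (epc_ints : List Int) (mod_size : Int) (out : Option Int) : Prop := out = find_perfect_seed_py_alt epc_ints mod_size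
instance (epc_ints : List Int) (mod_size : Int) (out : Option Int) : Decidable (Spec_find_perfect_seed_py epc_ints mod_size out) := by unfold Spec_find_perfect_seed_py; infer_instance

-- ===== CLAIM (what is proved, stated in full; the proofs are below) =====
def Claim_equal_find_perfect_seed_py : Prop := ∀ (epc_ints : List Int) (mod_size : Int), Dom_find_perfect_seed_py epc_ints mod_size → Pre_find_perfect_seed_py epc_ints mod_size → Spec_find_perfect_seed_py epc_ints mod_size (find_perfect_seed_py epc_ints mod_size)

-- ===== LEMMAS AND PROOFS =====

-- hash of val under seed
def pvHash (mod_size seed val : Int) : Int := PySem.Int.mod (PySem.Int.bxor val seed) mod_size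

-- A's inner loop finds no collision iff slots ++ new hashes are all distinct
theorem pv_innerA_iff (seed mod_size : Int) (l : List Int) (slots : PySem.Set Int)
    (hn : slots.Nodup) :
    pvInnerA seed mod_size l slots = false ↔
      (slots ++ l.map (pvHash mod_size seed)).Nodup := by
  induction l generalizing slots with
  | nil => simp [pvInnerA, hn]
  | cons v rest ih =>
    simp only [pvInnerA, List.map_cons]
    set s := PySem.Int.mod (PySem.Int.bxor v seed) mod_size with hs
    by_cases hmem : s ∈ slots
    · have : PySem.Set.contains slots s = true := by
        rw [PySem.Set.contains_iff]; exact hmem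
      rw [this]
      simp only [if_true]
      constructor
      · intro h; cases h
      · intro h
        exfalso
        have := List.Nodup.disjoint h
        exact this hmem (by simp [pvHash, ← hs])
    · have hc : PySem.Set.contains slots s = false := by
        rw [← Bool.not_eq_true, PySem.Set.contains_iff]; exact hmem
      rw [hc]
      simp only [Bool.false_eq_true, if_false]
      rw [PySem.Set.add_of_not_mem hmem]
      have hns : (slots ++ [s]).Nodup := by
        refine List.Nodup.append hn (List.nodup_singleton s) ?_
        intro a ha hb
        rw [List.mem_singleton] at hb
        exact hmem (hb ▸ ha)
      rw [ih (slots ++ [s]) hns]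
      simp [pvHash, ← hs, List.append_assoc]

-- membership after the innermost seed fold
theorem pv_mem_foldl_stepSeed (mod_size a b : Int) (seeds : List Int) (bad : PySem.Set Int) (y : Int) :
    y ∈ seeds.foldl (pvStepSeed mod_size a b) bad ↔
      y ∈ bad ∨ (y ∈ seeds ∧ pvHash mod_size y a = pvHash mod_size y b) := by
  induction seeds generalizing bad with
  | nil => simp
  | cons s rest ih =>
    simp only [List.foldl_cons, ih, pvStepSeed]
    split
    · rename_i hcond
      rw [PySem.Set.mem_add]
      constructor
      · rintro ((h | rfl) | ⟨hm, he⟩)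
        · exact Or.inl h
        · exact Or.inr ⟨List.mem_cons_self, hcond⟩
        · exact Or.inr ⟨List.mem_cons_of_mem _ hm, he⟩
      · rintro (h | ⟨hm, he⟩)
        · exact Or.inl (Or.inl h)
        · rcases List.mem_cons.mp hm with rfl | hm'
          · exact Or.inl (Or.inr rfl)
          · exact Or.inr ⟨hm', he⟩
    · rename_i hcond
      constructor
      · rintro (h | ⟨hm, he⟩)
        · exact Or.inl h
        · exact Or.inr ⟨List.mem_cons_of_mem _ hm, he⟩
      · rintro (h | ⟨hm, he⟩)
        · exact Or.inl h
        · rcases List.mem_cons.mp hm with rfl | hm'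
          · exact absurd he hcond
          · exact Or.inr ⟨hm', he⟩

-- membership after the j fold
theorem pv_mem_foldl_stepJ (epc_ints : List Int) (mod_size i : Int) (js : List Int) (bad : PySem.Set Int) (y : Int) :
    y ∈ js.foldl (pvStepJ epc_ints mod_size i) bad ↔
      y ∈ bad ∨ ∃ j ∈ js, (0 ≤ y ∧ y < 16) ∧
        pvHash mod_size y (PySem.List.pyGetD epc_ints i 0) = pvHash mod_size y (PySem.List.pyGetD epc_ints j 0) := by
  induction js generalizing bad with
  | nil => simp
  | cons j rest ih =>
    simp only [List.foldl_cons, ih, pvStepJ, pv_mem_foldl_stepSeed, PySem.List.mem_pyRange_one]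
    constructor
    · rintro ((h | h) | ⟨j', hm, h⟩)
      · exact Or.inl h
      · exact Or.inr ⟨j, List.mem_cons_self, h⟩
      · exact Or.inr ⟨j', List.mem_cons_of_mem _ hm, h⟩
    · rintro (h | ⟨j', hm, h⟩)
      · exact Or.inl (Or.inl h)
      · rcases List.mem_cons.mp hm with rfl | hm'
        · exact Or.inl (Or.inr h)
        · exact Or.inr ⟨j', hm', h⟩

-- membership after the i fold
theorem pv_mem_foldl_stepI (epc_ints : List Int) (mod_size : Int) (is : List Int) (bad : PySem.Set Int) (y : Int) :
    y ∈ is.foldl (pvStepI epc_ints mod_size) bad ↔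
      y ∈ bad ∨ ∃ i ∈ is, ∃ j ∈ PySem.List.pyRange (i + 1) (epc_ints.length : Int) 1, (0 ≤ y ∧ y < 16) ∧
        pvHash mod_size y (PySem.List.pyGetD epc_ints i 0) = pvHash mod_size y (PySem.List.pyGetD epc_ints j 0) := by
  induction is generalizing bad with
  | nil => simp
  | cons i rest ih =>
    simp only [List.foldl_cons, ih, pvStepI, pv_mem_foldl_stepJ]
    constructor
    · rintro ((h | h) | ⟨i', hm, h⟩)
      · exact Or.inl h
      · exact Or.inr ⟨i, List.mem_cons_self, h⟩
      · exact Or.inr ⟨i', List.mem_cons_of_mem _ hm, h⟩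
    · rintro (h | ⟨i', hm, h⟩)
      · exact Or.inl (Or.inl h)
      · rcases List.mem_cons.mp hm with rfl | hm'
        · exact Or.inl (Or.inr h)
        · exact Or.inr ⟨i', hm', h⟩

-- for a seed in range(16): seed ∈ bad set ↔ the hash list has a duplicate
theorem pv_mem_badSet_iff (epc_ints : List Int) (mod_size y : Int) (h0 : 0 ≤ y) (h16 : y < 16) :
    y ∈ pvBadSet epc_ints mod_size ↔ ¬ (epc_ints.map (pvHash mod_size y)).Nodup := by
  unfold pvBadSet
  rw [pv_mem_foldl_stepI]
  simp only [PySem.Set.empty, List.not_mem_nil, false_or, PySem.List.mem_pyRange_one]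
  constructor
  · rintro ⟨i, ⟨hi0, hin⟩, j, ⟨hji, hjn⟩, _, heq⟩
    intro hnd
    have hij : i.toNat < j.toNat := by omega
    have hjlt : j.toNat < epc_ints.length := by omega
    have hilt : i.toNat < epc_ints.length := by omega
    rw [PySem.List.pyGetD_eq_getElem (i := i) epc_ints 0 hi0 (by omega),
        PySem.List.pyGetD_eq_getElem (i := j) epc_ints 0 (by omega) (by omega)] at heq
    have hpw := (List.nodup_iff_injective_get.mp hnd)
    have : (epc_ints.map (pvHash mod_size y))[i.toNat]'(by simpa using hilt)
         = (epc_ints.map (pvHash mod_size y))[j.toNat]'(by simpa using hjlt) := by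
      simp only [List.getElem_map]; exact heq
    have := hpw (a₁ := ⟨i.toNat, by simpa using hilt⟩) (a₂ := ⟨j.toNat, by simpa using hjlt⟩) (by simpa using this)
    simp at this; omega
  · intro hnd
    rw [List.nodup_iff_injective_get] at hnd
    simp only [Function.Injective, not_forall] at hnd
    obtain ⟨⟨ni, hni⟩, ⟨nj, hnj⟩, heq, hne⟩ := hnd
    simp only [List.length_map] at hni hnj
    have hgi : (epc_ints.map (pvHash mod_size y)).get ⟨ni, by simpa using hni⟩ = pvHash mod_size y epc_ints[ni] := by simp
    have hgj : (epc_ints.map (pvHash mod_size y)).get ⟨nj, by simpa using hnj⟩ = pvHash mod_size y epc_ints[nj] := by simp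
    rw [hgi, hgj] at heq
    have hne' : ni ≠ nj := by simpa using hne
    -- order the two indices
    rcases lt_or_gt_of_ne hne' with hlt | hlt
    · refine ⟨(ni : Int), ⟨by omega, by omega⟩, (nj : Int), ⟨by omega, by omega⟩, ⟨h0, h16⟩, ?_⟩
      rw [PySem.List.pyGetD_eq_getElem (i := (ni : Int)) epc_ints 0 (by omega) (by omega),
          PySem.List.pyGetD_eq_getElem (i := (nj : Int)) epc_ints 0 (by omega) (by omega)]
      simpa using heq
    · refine ⟨(nj : Int), ⟨by omega, by omega⟩, (ni : Int), ⟨by omega, by omega⟩, ⟨h0, h16⟩, ?_⟩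
      rw [PySem.List.pyGetD_eq_getElem (i := (nj : Int)) epc_ints 0 (by omega) (by omega),
          PySem.List.pyGetD_eq_getElem (i := (ni : Int)) epc_ints 0 (by omega) (by omega)]
      simpa using heq.symm
  
-- the two top-level loops agree on any seed list whose elements lie in [0, 16)
theorem pv_loops_eq (epc_ints : List Int) (mod_size : Int) (seeds : List Int)
    (hb : ∀ y ∈ seeds, 0 ≤ y ∧ y < 16) :
    pvSeedLoopA epc_ints mod_size seeds = pvFirstGood (pvBadSet epc_ints mod_size) seeds := by
  induction seeds with
  | nil => rfl
  | cons seed rest ih =>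
    obtain ⟨h0, h16⟩ := hb seed List.mem_cons_self
    have hmem := pv_mem_badSet_iff epc_ints mod_size seed h0 h16
    have hA := pv_innerA_iff seed mod_size epc_ints [] List.nodup_nil
    rw [List.nil_append] at hA
    simp only [pvSeedLoopA, pvFirstGood]
    by_cases hnd : (epc_ints.map (pvHash mod_size seed)).Nodup
    · have h1 : pvInnerA seed mod_size epc_ints [] = false := hA.mpr hnd
      have h2 : seed ∉ pvBadSet epc_ints mod_size := fun h => (hmem.mp h) hnd
      simp [h1, h2, PySem.Set.empty]
    · have h1 : pvInnerA seed mod_size epc_ints [] = true := by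
        cases hx : pvInnerA seed mod_size epc_ints [] with
        | false => exact absurd (hA.mp hx) hnd
        | true => rfl
      have h2 : seed ∈ pvBadSet epc_ints mod_size := hmem.mpr hnd
      simp [h1, h2, ih (fun y hy => hb y (List.mem_cons_of_mem _ hy))]

-- ===== VERDICT (by name: the statement is the Claim_ definition above) =====
theorem find_perfect_seed_py_spec : Claim_equal_find_perfect_seed_py := by
  intro epc_ints mod_size _ _
  unfold Spec_find_perfect_seed_py find_perfect_seed_py find_perfect_seed_py_alt
  exact pv_loops_eq epc_ints mod_size _ (by
    intro y hy
    rw [PySem.List.mem_pyRange_one] at hy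
    omega)
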